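-- pv_equiv track=rewrite | github.com/raghavpatel2507/AgentSphere-AI | src/mcp_servers/file-system-mcp-server/file-system-mcp-server/windows_utils.py | is_valid_windows_path
-- ===== SOURCE A (Python) =====
-- def is_valid_windows_path(path):
--     """
--     Check if a path is a valid Windows path.
--     """
--     if not path:
--         return False
--
--     # Check for invalid characters in Windows paths
--     invalid_chars = '<>:"|?*'
--     for char in invalid_chars:
--         if char in path:
--             return False
--
--     # Check for reserved names
--     parts = path.split('\\')
--     reserved_names = [
--         'CON', 'PRN', 'AUX', 'NUL',
--         'COM1', 'COM2', 'COM3', 'COM4', 'COM5', 'COM6', 'COM7', 'COM8', 'COM9',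
--         'LPT1', 'LPT2', 'LPT3', 'LPT4', 'LPT5', 'LPT6', 'LPT7', 'LPT8', 'LPT9'
--     ]
--
--     for part in parts:
--         if part.upper() in reserved_names:
--             return False
--
--     return True
-- ===== SOURCE B (Python) =====
-- _RESERVED = frozenset([
--     'CON', 'PRN', 'AUX', 'NUL',
--     'COM1', 'COM2', 'COM3', 'COM4', 'COM5', 'COM6', 'COM7', 'COM8', 'COM9',
--     'LPT1', 'LPT2', 'LPT3', 'LPT4', 'LPT5', 'LPT6', 'LPT7', 'LPT8', 'LPT9',
-- ])
-- _INVALID = '<>:"|?*'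
--
--
-- def is_valid_windows_path(path):
--     """Single pass over the characters: reject invalid characters on sight and
--     check each backslash-separated component (uppercased as it is built)
--     against the reserved-name set at every component boundary."""
--     if not path:
--         return False
--     comp = []
--     for ch in path:
--         if ch in _INVALID:
--             return False
--         if ch == '\\':
--             if ''.join(comp) in _RESERVED:
--                 return False
--             comp = []
--         else:
--             comp.append(ch.upper())
--     return ''.join(comp) not in _RESERVED
-- ===== Notes on version B (the rewrite author's own statement) =====
-- stated objective: alternative
-- what changed: Replaced A's three separate passes (seven substring scans for invalid characters, a split on backslash, then a loop uppercasing each part) by one single left-to-right pass that rejects invalid characters on sight and checks each component, uppercased character by character as it is built, against a reserved-name set at every backslash boundary.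
import Mathlib
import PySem

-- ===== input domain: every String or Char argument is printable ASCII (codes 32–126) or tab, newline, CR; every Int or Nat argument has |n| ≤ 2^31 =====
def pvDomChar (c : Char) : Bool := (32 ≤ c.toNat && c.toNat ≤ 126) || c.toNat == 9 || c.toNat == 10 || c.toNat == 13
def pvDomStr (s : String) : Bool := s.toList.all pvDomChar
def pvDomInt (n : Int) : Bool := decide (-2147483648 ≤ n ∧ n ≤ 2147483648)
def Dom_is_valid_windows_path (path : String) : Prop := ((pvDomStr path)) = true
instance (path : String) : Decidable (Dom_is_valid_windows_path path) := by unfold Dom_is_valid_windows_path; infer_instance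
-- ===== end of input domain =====

-- B replaces A's three passes (invalid-character scans, split, reserved-name loop)
-- by one single left-to-right pass checking each component at its backslash boundary
-- (objective: alternative, same O(n) cost).

def pvReserved : List String :=
  ["CON", "PRN", "AUX", "NUL",
   "COM1", "COM2", "COM3", "COM4", "COM5", "COM6", "COM7", "COM8", "COM9",
   "LPT1", "LPT2", "LPT3", "LPT4", "LPT5", "LPT6", "LPT7", "LPT8", "LPT9"]

-- ===== PORT A =====
-- literal transliteration: empty guard; loop over invalid chars testing 'char in path';
-- split on '\\'; loop over parts testing part.upper() membership.
def pvInvalidChars : List Char := ['<', '>', ':', '"', '|', '?', '*']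

def is_valid_windows_path (path : String) : Bool :=
  if path == "" then false
  else if pvInvalidChars.any (fun c => PySem.Str.isIn (String.ofList [c]) path) then false
  else
    let parts := (PySem.Str.split? path "\\").getD []   -- sep "\\" ≠ "", so split? is `some`
    if parts.any (fun part => pvReserved.contains (PySem.Str.upper part)) then false
    else true

-- ===== PORT B =====
-- single pass: comp accumulates the current component uppercased; at each '\\'
-- (and at the end) the component is checked against the reserved set.
def pvGoB : List Char → List Char → Bool
  | [], comp => !(pvReserved.contains (String.ofList comp))
  | c :: rest, comp =>
    if pvInvalidChars.contains c then false
    else if c == '\\' then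
      if pvReserved.contains (String.ofList comp) then false else pvGoB rest []
    else pvGoB rest (comp ++ [PySem.Chars.upperChar c])

def is_valid_windows_path_alt (path : String) : Bool :=
  if path == "" then false
  else pvGoB path.toList []

-- ===== PRECONDITION & SPEC =====
def Spec_is_valid_windows_path (path : String) (out : Bool) : Prop := out = is_valid_windows_path_alt path
instance (path : String) (out : Bool) : Decidable (Spec_is_valid_windows_path path out) := by unfold Spec_is_valid_windows_path; infer_instance

-- ===== CLAIM (what is proved, stated in full; the proofs are below) =====
def Claim_equal_is_valid_windows_path : Prop := ∀ (path : String), Dom_is_valid_windows_path path → Spec_is_valid_windows_path path (is_valid_windows_path path)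

-- ===== LEMMAS AND PROOFS =====

-- structural reference splitter on the single separator character '\'
def pvSplit (pre : List Char) : List Char → List (List Char)
  | [] => [pre]
  | c :: rest => if c == '\\' then pre :: pvSplit [] rest else pvSplit (pre ++ [c]) rest

theorem pvGo_eq_pvSplit (l : List Char) : ∀ (fuel : Nat) (cur : List Char) (acc : List (List Char)),
    l.length ≤ fuel →
    PySem.Chars.splitOn.go ['\\'] fuel l cur acc = acc.reverse ++ (pvSplit cur.reverse l).map id := by
  induction l with
  | nil =>
    intro fuel cur acc _
    cases fuel <;> simp [PySem.Chars.splitOn.go, pvSplit]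
  | cons c rest ih =>
    intro fuel cur acc hf
    cases fuel with
    | zero => simp at hf
    | succ f =>
      by_cases hc : c = '\\'
      · subst hc
        simp only [PySem.Chars.splitOn.go, pvSplit, List.isPrefixOf]
        simp [ih f [] (cur.reverse :: acc) (by simpa using hf)]
      · have hbe : ('\\' == c) = false := by
          simpa using fun h => hc h.symm
        have hbe' : (c == '\\') = false := by simpa using hc
        simp only [PySem.Chars.splitOn.go, pvSplit, List.isPrefixOf, hbe, hbe',
          Bool.false_and, Bool.false_eq_true, if_false]
        simpa using ih f (c :: cur) acc (by simpa using hf)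

theorem pvSplitOn_eq (l : List Char) : PySem.Chars.splitOn l ['\\'] = pvSplit [] l := by
  simpa using pvGo_eq_pvSplit l (l.length + 1) [] [] (by omega)

-- core invariant of B's single pass
theorem pvGoB_spec (l : List Char) : ∀ (comp : List Char),
    pvGoB l (comp.map PySem.Chars.upperChar)
      = ((!l.any (fun c => pvInvalidChars.contains c))
          && (pvSplit comp l).all
              (fun p => !pvReserved.contains (String.ofList (p.map PySem.Chars.upperChar)))) := by
  induction l with
  | nil =>
    intro comp
    simp [pvGoB, pvSplit]
  | cons c rest ih =>
    intro comp
    by_cases hinv : pvInvalidChars.contains c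
    · have hinv' : c ∈ pvInvalidChars := by simpa using hinv
      simp [pvGoB, pvSplit, hinv']
    · by_cases hc : c = '\\'
      · subst hc
        have hrec := ih []
        simp only [List.map_nil] at hrec
        simp only [pvGoB, hinv, Bool.false_eq_true, if_false, beq_self_eq_true, if_true,
          pvSplit, List.any_cons, List.all_cons, hrec]
        cases pvReserved.contains (String.ofList (comp.map PySem.Chars.upperChar)) <;>
          cases rest.any (fun c => pvInvalidChars.contains c) <;> simp
      · have hne : (c == '\\') = false := by simpa using hc
        have hrec := ih (comp ++ [c])
        simp only [List.map_append, List.map_cons, List.map_nil] at hrec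
        simp only [pvGoB, hinv, Bool.false_eq_true, if_false, hne, pvSplit, List.any_cons,
          hrec]
        simp

theorem pvSingleton_infix_iff (c : Char) (l : List Char) : [c] <:+: l ↔ c ∈ l := by
  constructor
  · intro h
    exact h.mem (List.mem_singleton_self c)
  · intro h
    rcases List.append_of_mem h with ⟨a, b, rfl⟩
    exact ⟨a, b, by simp⟩

theorem pvStr_upper_ofList (p : List Char) :
    PySem.Str.upper (String.ofList p) = String.ofList (p.map PySem.Chars.upperChar) := by
  have h := PySem.Str.toList_upper (String.ofList p)
  rw [String.toList_ofList] at h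
  rw [← String.ofList_toList (s := PySem.Str.upper (String.ofList p)), h]
  rfl

-- ===== VERDICT (by name: the statement is the Claim_ definition above) =====
theorem is_valid_windows_path_spec : Claim_equal_is_valid_windows_path := by
  intro path _
  unfold Spec_is_valid_windows_path is_valid_windows_path is_valid_windows_path_alt
  by_cases hemp : path == ""
  · simp [hemp]
  · simp only [hemp, Bool.false_eq_true, if_false]
    have hB := pvGoB_spec path.toList []
    simp only [List.map_nil] at hB
    -- invalid-character passes agree
    have hInv : pvInvalidChars.any (fun c => PySem.Str.isIn (String.ofList [c]) path)
        = path.toList.any (fun c => pvInvalidChars.contains c) := by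
      rw [Bool.eq_iff_iff]
      simp only [List.any_eq_true, PySem.Str.isIn_iff_infix, String.toList_ofList,
        List.contains_eq_mem, decide_eq_true_eq, pvSingleton_infix_iff]
      tauto
    -- the split of A equals the reference splitter
    have hSplit : (PySem.Str.split? path "\\").getD []
        = (pvSplit [] path.toList).map String.ofList := by
      have h : ("\\" : String).toList = ['\\'] := by decide
      simp [PySem.Str.split?, PySem.Chars.split?, h, pvSplitOn_eq]
    -- the reserved-name pass of A is the negation of B's all-components check
    have hRes : ((pvSplit [] path.toList).map String.ofList).any
          (fun part => pvReserved.contains (PySem.Str.upper part))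
        = !((pvSplit [] path.toList).all
          (fun p => !pvReserved.contains (String.ofList (p.map PySem.Chars.upperChar)))) := by
      rw [List.any_map, List.all_eq_not_any_not, Bool.not_not]
      exact List.any_congr rfl (fun p => by simp [Function.comp, pvStr_upper_ofList])
    rw [hInv, hSplit, hRes, hB]
    cases path.toList.any (fun c => pvInvalidChars.contains c) <;>
      cases (pvSplit [] path.toList).all
        (fun p => !pvReserved.contains (String.ofList (p.map PySem.Chars.upperChar))) <;> simp
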